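-- pv_equiv track=rewrite | github.com/UlsanCollege-English/week-2-assignment-4-service-queue-BudhaRajgiri | src/queueops.py | move_to_back
-- ===== SOURCE A (Python) =====
-- from typing import List, Tuple
--
-- def move_to_back(queue: List[str], name: str) -> List[str]:
--     """Return a new queue where the first occurrence of `name` is moved to the back.
--
--     If `name` is not present, return the queue unchanged (new list).
--     """
--     if name not in queue:
--         return queue[:]
--
--     new_queue = []
--     found = False
--
--     for person in queue:
--         if person == name and not found:
--             found = True
--             continue
--         new_queue.append(person)
--
--     new_queue.append(name)
--     return new_queue
-- ===== SOURCE B (Python) =====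
-- def move_to_back(queue, name):
--     if name not in queue:
--         return queue[:]
--     i = queue.index(name)
--     return queue[:i] + queue[i+1:] + [name]
-- ===== Notes on version B (the rewrite author's own statement) =====
-- stated objective: simpler
-- what changed: Replaces the flagged element-by-element copy loop with a single index lookup and slice concatenation queue[:i] + queue[i+1:] + [name].
import Mathlib
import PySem

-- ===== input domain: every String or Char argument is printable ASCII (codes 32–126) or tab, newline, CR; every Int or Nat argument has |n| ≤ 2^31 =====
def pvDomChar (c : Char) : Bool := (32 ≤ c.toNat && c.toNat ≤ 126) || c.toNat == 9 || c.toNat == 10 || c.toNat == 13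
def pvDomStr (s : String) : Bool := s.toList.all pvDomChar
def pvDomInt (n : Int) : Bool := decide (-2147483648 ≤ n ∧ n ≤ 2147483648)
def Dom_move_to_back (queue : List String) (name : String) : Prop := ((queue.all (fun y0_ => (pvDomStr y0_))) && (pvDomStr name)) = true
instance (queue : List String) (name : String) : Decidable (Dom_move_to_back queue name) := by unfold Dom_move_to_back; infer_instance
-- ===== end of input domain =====

-- B moves the first occurrence of `name` to the back via index + slice concatenation
-- instead of A's flagged element-by-element copy loop (simpler decomposition, same O(n) cost).

-- ===== PORT A =====
-- the for-loop over `queue` carrying (new_queue, found)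
def mtbLoop (queue : List String) (name : String) (acc : List String) (found : Bool) : List String :=
  match queue with
  | [] => acc
  | person :: rest =>
    if person = name ∧ found = false then mtbLoop rest name acc true
    else mtbLoop rest name (acc ++ [person]) found

def move_to_back (queue : List String) (name : String) : List String :=
  if name ∉ queue then queue
  else mtbLoop queue name [] false ++ [name]

-- ===== PORT B =====
def move_to_back_alt (queue : List String) (name : String) : List String :=
  match PySem.List.index? queue name with
  | none => queue
  | some i =>
    PySem.List.slice queue none (some (i : Int)) ++
      PySem.List.slice queue (some ((i : Int) + 1)) none ++ [name]

-- ===== PRECONDITION & SPEC =====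
def Spec_move_to_back (queue : List String) (name : String) (out : List String) : Prop := out = move_to_back_alt queue name
instance (queue : List String) (name : String) (out : List String) : Decidable (Spec_move_to_back queue name out) := by unfold Spec_move_to_back; infer_instance

-- ===== CLAIM (what is proved, stated in full; the proofs are below) =====
def Claim_equal_move_to_back : Prop := ∀ (queue : List String) (name : String), Dom_move_to_back queue name → Spec_move_to_back queue name (move_to_back queue name)

-- ===== LEMMAS AND PROOFS =====
theorem mtbLoop_true (queue : List String) (name : String) (acc : List String) :
    mtbLoop queue name acc true = acc ++ queue := by
  induction queue generalizing acc with
  | nil => simp [mtbLoop]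
  | cons p rest ih => simp [mtbLoop, ih]

theorem mtbLoop_false (queue : List String) (name : String) (acc : List String)
    (h : name ∈ queue) :
    mtbLoop queue name acc false =
      acc ++ queue.take (queue.idxOf name) ++ queue.drop (queue.idxOf name + 1) := by
  induction queue generalizing acc with
  | nil => simp at h
  | cons p rest ih =>
    by_cases hp : p = name
    · subst hp
      simp [mtbLoop, mtbLoop_true, List.idxOf_cons_self]
    · have hmem : name ∈ rest := by
        rcases List.mem_cons.mp h with h' | h'
        · exact absurd h'.symm hp
        · exact h'
      have hx : (p :: rest).idxOf name = (rest.idxOf name).succ :=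
        List.idxOf_cons_ne rest hp
      simp [mtbLoop, hp, ih _ hmem, hx]

theorem index?_of_mem (queue : List String) (name : String) (h : name ∈ queue) :
    PySem.List.index? queue name = some (queue.idxOf name) := by
  induction queue with
  | nil => simp at h
  | cons p rest ih =>
    by_cases hp : p = name
    · subst hp
      rw [PySem.List.index?_cons_self, List.idxOf_cons_self]
    · have hmem : name ∈ rest := by
        rcases List.mem_cons.mp h with h' | h'
        · exact absurd h'.symm hp
        · exact h'
      rw [PySem.List.index?_cons_of_ne rest hp, ih hmem,
        List.idxOf_cons_ne rest hp]
      rfl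

-- ===== VERDICT (by name: the statement is the Claim_ definition above) =====
theorem move_to_back_spec : Claim_equal_move_to_back := by
  intro queue name _
  unfold Spec_move_to_back move_to_back move_to_back_alt
  by_cases h : name ∈ queue
  · rw [index?_of_mem queue name h]
    simp only [h, not_true_eq_false, if_false]
    rw [mtbLoop_false queue name [] h]
    have h2 : PySem.List.slice queue (some (((queue.idxOf name : Nat) : Int) + 1)) none =
        queue.drop (queue.idxOf name + 1) := by
      have := PySem.List.slice_from_natCast queue (queue.idxOf name + 1)
      push_cast at this
      exact this
    rw [PySem.List.slice_to_natCast queue (queue.idxOf name), h2]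
    simp
  · rw [(PySem.List.index?_eq_none_iff queue name).mpr h]
    simp [h]
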